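-- pv_equiv track=rewrite | github.com/Wineclaw/BeginnerPythonScripts | Chapter 7 Exercises.py | sumAllstopEven
-- ===== SOURCE A (Python) =====
-- def sumAllstopEven(lst):
--     total = 0
--     for n in lst:
--         if n % 2 == 0:
--             break
--         else:
--             total += n
--     return total
-- ===== SOURCE B (Python) =====
-- def sumAllstopEven(lst):
--     # Back-to-front pass: an even element wipes the running sum, so after the
--     # full reversed traversal only the odd prefix before the first even survives.
--     acc = 0
--     for n in reversed(lst):
--         acc = 0 if n % 2 == 0 else acc + n
--     return acc
-- ===== Notes on version B (the rewrite author's own statement) =====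
-- stated objective: alternative
-- what changed: Replaces the forward accumulate-and-break loop by a full back-to-front fold whose accumulator is reset to 0 at every even element, leaving exactly the sum of the odd prefix.
import Mathlib
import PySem

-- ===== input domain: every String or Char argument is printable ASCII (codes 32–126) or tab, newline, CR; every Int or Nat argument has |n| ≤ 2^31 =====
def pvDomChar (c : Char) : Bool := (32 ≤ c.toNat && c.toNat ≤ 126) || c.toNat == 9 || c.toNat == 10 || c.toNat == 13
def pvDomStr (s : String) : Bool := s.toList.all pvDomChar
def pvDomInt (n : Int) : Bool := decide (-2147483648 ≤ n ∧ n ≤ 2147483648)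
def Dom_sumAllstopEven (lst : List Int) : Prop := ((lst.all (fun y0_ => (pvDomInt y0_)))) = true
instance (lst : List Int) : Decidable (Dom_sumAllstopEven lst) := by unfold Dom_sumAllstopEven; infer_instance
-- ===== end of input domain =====

-- ===== PORT A =====
-- A: forward loop, accumulate odd elements, break at the first even
def sumAllstopEvenLoop (lst : List Int) (total : Int) : Int :=
  match lst with
  | [] => total
  | n :: rest =>
    if PySem.Int.mod n 2 = 0 then total
    else sumAllstopEvenLoop rest (total + n)

def sumAllstopEven (lst : List Int) : Int := sumAllstopEvenLoop lst 0

-- ===== PORT B =====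
-- B: fold over the reversed list; an even element resets the accumulator to 0
def sumAllstopEven_alt (lst : List Int) : Int :=
  lst.reverse.foldl (fun acc n => if PySem.Int.mod n 2 = 0 then 0 else acc + n) 0

-- ===== PRECONDITION & SPEC =====
def Spec_sumAllstopEven (lst : List Int) (out : Int) : Prop := out = sumAllstopEven_alt lst
instance (lst : List Int) (out : Int) : Decidable (Spec_sumAllstopEven lst out) := by unfold Spec_sumAllstopEven; infer_instance

-- ===== CLAIM (what is proved, stated in full; the proofs are below) =====
def Claim_equal_sumAllstopEven : Prop := ∀ (lst : List Int), Dom_sumAllstopEven lst → Spec_sumAllstopEven lst (sumAllstopEven lst)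

-- ===== LEMMAS AND PROOFS =====
lemma loop_eq_foldr (lst : List Int) (t : Int) :
    sumAllstopEvenLoop lst t =
      t + lst.foldr (fun n acc => if PySem.Int.mod n 2 = 0 then 0 else acc + n) 0 := by
  induction lst generalizing t with
  | nil => simp [sumAllstopEvenLoop]
  | cons n rest ih =>
    simp only [sumAllstopEvenLoop, List.foldr]
    by_cases h : PySem.Int.mod n 2 = 0
    · rw [if_pos h, if_pos h]; ring
    · rw [if_neg h, if_neg h, ih]
      ring

-- ===== VERDICT (by name: the statement is the Claim_ definition above) =====
theorem sumAllstopEven_spec : Claim_equal_sumAllstopEven := by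
  intro lst _
  unfold Spec_sumAllstopEven sumAllstopEven sumAllstopEven_alt
  rw [List.foldl_reverse]
  simpa using loop_eq_foldr lst 0
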